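-- pv_equiv track=rewrite | github.com/arn-br/advent-of-code-2025 | day 2/day-2.py | generate_invalid_in_range_p1
-- ===== SOURCE A (Python) =====
-- def generate_invalid_in_range_p1(low, high):
--     results = []
--
--     low_len = len(str(low)) #digits for the lowest id
--     high_len = len(str(high)) #digits for the highest id
--
--     #calculating the smallest number to double, i.e. if num_min = 20, the first number to test will be 2020
--     if (low_len % 2) == 1 :
--         low_len += 1
--         half_low_len = int(low_len/2)
--         num_min = "1" + "0" * (half_low_len + 1)
--         num_min = num_min[0:half_low_len]
--     else:
--         half_low_len = int(low_len/2)
--         string1 = str(low)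
--         num_min = string1[0:half_low_len]
--
--
--     max_num = "9" * (half_low_len+1) #calculating the max number to be the half
--     for i in range(int(num_min), int(max_num)):
--         num = str(i) * 2
--
--         if int(num) > high:
--             break
--
--         if int(num) >= low and int(num) <= high :
--             results.append(int(num))
--
--     return results
-- ===== SOURCE B (Python) =====
-- def generate_invalid_in_range_p1(low, high):
--     # A doubled number is i concatenated with itself: int(str(i)*2) == i * (10**L + 1)
--     # where L = len(str(i)).  That value is increasing in i, so each half-length L
--     # contributes one contiguous block of results, computed directly by arithmetic.
--     d = len(str(low))
--     if d % 2 == 1: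
--         half = (d + 1) // 2
--         start = 10 ** (half - 1)
--     else:
--         half = d // 2
--         start = low // 10 ** half
--     out = []
--     for L in (half, half + 1):
--         m = 10 ** L + 1
--         lo = max(start if L == half else 10 ** half, -(-low // m))
--         hi = min(10 ** L - 1, high // m)
--         out.extend(i * m for i in range(lo, hi + 1))
--     return out
-- ===== Notes on version B (the rewrite author's own statement) =====
-- stated objective: alternative
-- what changed: B replaces A's per-candidate loop (string-double each half i, int() it, compare, break) by computing, for each of the two half-lengths L, the exact integer interval of halves via the identity int(str(i)*2) == i*(10**L+1) (ceil/floor divisions) and emitting each contiguous result block arithmetically; Pre_ keeps only the inputs where A returns (A raises ValueError when low < 0 and len(str(low)) is even: num_min then starts with '-').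
-- intended difference: When high is at least the all-nines doubled number 10^(2h+2)-1 (h the half-length A derives from len(str(low))), A's exclusive range(..., int('9'*(h+1))) silently drops the final candidate half 10^(h+1)-1 and omits that doubled number (e.g. 9999 for low=98, high=9999) while B includes it, which is what 'all doubled numbers in [low,high]' intends. — e.g. on generate_invalid_in_range_p1(98, 9999): A returns [99, 1010, 1111, 1212, 1313, 1414, 1515, 1616, 1717, 1818, 1919, 2020, 2121, 2222, 2323, 2424, 2525, 2626, 2727, 2828, …, B returns [99, 1010, 1111, 1212, 1313, 1414, 1515, 1616, 1717, 1818, 1919, 2020, 2121, 2222, 2323, 2424, 2525, 2626, 2727, 2828, …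
import Mathlib
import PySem

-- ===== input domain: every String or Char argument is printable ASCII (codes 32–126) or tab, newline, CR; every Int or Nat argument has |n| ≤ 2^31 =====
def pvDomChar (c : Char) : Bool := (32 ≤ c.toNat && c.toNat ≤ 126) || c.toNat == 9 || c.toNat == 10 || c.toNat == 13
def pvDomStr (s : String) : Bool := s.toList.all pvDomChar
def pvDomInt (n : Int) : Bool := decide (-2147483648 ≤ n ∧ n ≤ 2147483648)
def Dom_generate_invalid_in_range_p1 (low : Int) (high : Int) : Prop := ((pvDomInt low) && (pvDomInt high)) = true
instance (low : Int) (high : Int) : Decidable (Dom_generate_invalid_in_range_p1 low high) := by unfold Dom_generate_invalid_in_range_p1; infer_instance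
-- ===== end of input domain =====

-- B replaces A's per-candidate string-doubling scan (str(i)*2, int(), break) by direct
-- arithmetic construction of the two contiguous result blocks, one per half-length; where
-- high reaches the all-nines doubled number, B includes it while A's exclusive range drops it (D_).


-- ===== PORT A =====

-- hand port of Python's int(s) (PySem.Int.ofStr? is its PySem form): exact for an optional
-- sign followed by ASCII decimal digits, with no whitespace or underscores — which is the
-- only shape A ever feeds to int(); none = ValueError.
def pvStep (a : Nat) (c : Char) : Nat := a * 10 + (c.toNat - 48)

def pvDigitsVal? (cs : List Char) : Option Nat :=
  if cs ≠ [] ∧ cs.all Char.isDigit then some (cs.foldl pvStep 0) else none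

def pvInt? (cs : List Char) : Option Int :=
  if cs.head? = some '-' then (pvDigitsVal? cs.tail).map (fun n => -(n : Int))
  else if cs.head? = some '+' then (pvDigitsVal? cs.tail).map (fun n => (n : Int))
  else (pvDigitsVal? cs).map (fun n => (n : Int))

-- the 'for i in range(...)' loop of A, with its break (acc = results so far)
def pvLoopA (low high : Int) : List Int → List Int → List Int
  | acc, [] => acc
  | acc, i :: rest =>
    let num : List Char := PySem.List.pyRepeat (PySem.Int.toChars i) 2   -- num = str(i) * 2
    match pvInt? num with
    | none => acc                                                        -- int(num) raises: unreachable inside Pre_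
    | some v =>
      if high < v then acc                                               -- if int(num) > high: break
      else if low ≤ v ∧ v ≤ high then pvLoopA low high (acc ++ [v]) rest -- results.append(int(num))
      else pvLoopA low high acc rest

def generate_invalid_in_range_p1 (low : Int) (high : Int) : List Int :=
  let low_len : Int := ((PySem.Int.toChars low).length : Int)            -- low_len = len(str(low))
  let _high_len : Int := ((PySem.Int.toChars high).length : Int)        -- high_len = len(str(high))  (A never uses it)
  let hm : Int × List Char :=
    if PySem.Int.mod low_len 2 = 1 then
      let low_len2 := low_len + 1                                        -- low_len += 1
      let half_low_len := PySem.Int.floordiv low_len2 2                  -- int(low_len/2): exact, low_len is even and ≥ 2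
      let num_min : List Char := '1' :: List.replicate (half_low_len + 1).toNat '0'  -- "1" + "0"*(half_low_len+1)
      (half_low_len, PySem.List.slice num_min (some 0) (some half_low_len))          -- num_min[0:half_low_len]
    else
      let half_low_len := PySem.Int.floordiv low_len 2                   -- int(low_len/2): exact, low_len even
      let string1 : List Char := PySem.Int.toChars low                   -- string1 = str(low)
      (half_low_len, PySem.List.slice string1 (some 0) (some half_low_len))          -- string1[0:half_low_len]
  let half_low_len := hm.1
  let num_min := hm.2
  let max_num : List Char := List.replicate (half_low_len + 1).toNat '9' -- max_num = "9"*(half_low_len+1)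
  match pvInt? num_min, pvInt? max_num with                              -- range(int(num_min), int(max_num))
  | some a, some b => pvLoopA low high [] (PySem.List.pyRange a b 1)
  | _, _ => []                                                           -- int(num_min) raises ValueError: only outside Pre_

-- ===== PORT B =====

-- the 'd = len(str(low)); if d % 2 == 1: … else: …' half-length/start computation of Source B
def pvHalfStart (low : Int) : Int × Int :=
  let d : Int := ((PySem.Int.toChars low).length : Int)                  -- d = len(str(low))
  if PySem.Int.mod d 2 = 1 then
    let half := PySem.Int.floordiv (d + 1) 2                             -- half = (d + 1) // 2
    (half, (10 : Int) ^ (half - 1).toNat)                                -- start = 10 ** (half - 1)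
  else
    let half := PySem.Int.floordiv d 2                                   -- half = d // 2
    (half, PySem.Int.floordiv low ((10 : Int) ^ half.toNat))             -- start = low // 10 ** half

def generate_invalid_in_range_p1_alt (low : Int) (high : Int) : List Int :=
  let hs := pvHalfStart low
  let half := hs.1
  let start := hs.2
  ([half, half + 1] : List Int).foldl (fun out L =>
    let m : Int := (10 : Int) ^ L.toNat + 1                              -- m = 10 ** L + 1
    let lo : Int := max (if L = half then start else (10 : Int) ^ half.toNat)
                        (-(PySem.Int.floordiv (-low) m))                 -- lo = max(start/10**half, -(-low // m))
    let hi : Int := min ((10 : Int) ^ L.toNat - 1) (PySem.Int.floordiv high m)   -- hi = min(10**L - 1, high // m)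
    out ++ (PySem.List.pyRange lo (hi + 1) 1).map (fun i => i * m)) []

-- ===== PRECONDITION & SPEC =====

-- Pre_ excludes exactly the inputs where A raises ValueError: low < 0 with an even
-- len(str(low)) makes num_min start with '-', so int(num_min) or int(str(i)*2) raises.
def Pre_generate_invalid_in_range_p1 (low : Int) (high : Int) : Prop :=
  0 ≤ low ∨ (PySem.Int.toChars low).length % 2 = 1

instance (low : Int) (high : Int) : Decidable (Pre_generate_invalid_in_range_p1 low high) := by
  unfold Pre_generate_invalid_in_range_p1; infer_instance

def pvWitness_generate_invalid_in_range_p1 : Int × Int := (1, 100)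

-- When high is at least the all-nines doubled number 10^(2h+2)-1 (h the half-length A derives
-- from len(str(low))), A's exclusive range(..., int("9"*(h+1))) drops the final candidate half
-- 10^(h+1)-1 and omits that doubled number (e.g. 9999 for low=98, high=9999) while B includes
-- it, which is what "all doubled numbers in [low, high]" intends.
def D_generate_invalid_in_range_p1 (low : Int) (high : Int) : Prop :=
  (10 : Int) ^ (2 * ((if (PySem.Int.toChars low).length % 2 = 1
      then ((PySem.Int.toChars low).length + 1) / 2
      else (PySem.Int.toChars low).length / 2) + 1)) - 1 ≤ high

instance (low : Int) (high : Int) : Decidable (D_generate_invalid_in_range_p1 low high) := by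
  unfold D_generate_invalid_in_range_p1; infer_instance

def Spec_generate_invalid_in_range_p1 (low : Int) (high : Int) (out : List Int) : Prop :=
  ¬ D_generate_invalid_in_range_p1 low high → out = generate_invalid_in_range_p1_alt low high
instance (low : Int) (high : Int) (out : List Int) : Decidable (Spec_generate_invalid_in_range_p1 low high out) := by
  unfold Spec_generate_invalid_in_range_p1; infer_instance

def pvDiffWitness_generate_invalid_in_range_p1 : Int × Int := (98, 9999)

def pvDiffWitnessOut_generate_invalid_in_range_p1 : (List Int) × (List Int) :=
  ([99, 1010, 1111, 1212, 1313, 1414, 1515, 1616, 1717, 1818, 1919, 2020, 2121, 2222, 2323, 2424, 2525, 2626, 2727, 2828, 2929, 3030, 3131, 3232, 3333, 3434, 3535, 3636, 3737, 3838, 3939, 4040, 4141, 4242, 4343, 4444, 4545, 4646, 4747, 4848, 4949, 5050, 5151, 5252, 5353, 5454, 5555, 5656, 5757, 5858, 5959, 6060, 6161, 6262, 6363, 6464, 6565, 6666, 6767, 6868, 6969, 7070, 7171, 7272, 7373, 7474, 7575, 7676, 7777, 7878, 7979, 8080, 8181, 8282, 8383, 8484, 8585, 8686, 8787, 8888, 8989,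 9090, 9191, 9292, 9393, 9494, 9595, 9696, 9797, 9898],
   [99, 1010, 1111, 1212, 1313, 1414, 1515, 1616, 1717, 1818, 1919, 2020, 2121, 2222, 2323, 2424, 2525, 2626, 2727, 2828, 2929, 3030, 3131, 3232, 3333, 3434, 3535, 3636, 3737, 3838, 3939, 4040, 4141, 4242, 4343, 4444, 4545, 4646, 4747, 4848, 4949, 5050, 5151, 5252, 5353, 5454, 5555, 5656, 5757, 5858, 5959, 6060, 6161, 6262, 6363, 6464, 6565, 6666, 6767, 6868, 6969, 7070, 7171, 7272, 7373, 7474, 7575, 7676, 7777, 7878, 7979, 8080, 8181, 8282, 8383, 8484, 8585, 8686, 8787, 8888, 8989, 9090, 9191, 9292, 9393, 9494, 9595, 9696, 9797, 9898, 9999])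

-- ===== CLAIM (what is proved, stated in full; the proofs are below) =====
def Claim_unchanged_generate_invalid_in_range_p1 : Prop := ∀ (low : Int) (high : Int), Dom_generate_invalid_in_range_p1 low high → Pre_generate_invalid_in_range_p1 low high → Spec_generate_invalid_in_range_p1 low high (generate_invalid_in_range_p1 low high)
def Claim_changed_generate_invalid_in_range_p1 : Prop := Dom_generate_invalid_in_range_p1 (pvDiffWitness_generate_invalid_in_range_p1.1) (pvDiffWitness_generate_invalid_in_range_p1.2) ∧ Pre_generate_invalid_in_range_p1 (pvDiffWitness_generate_invalid_in_range_p1.1) (pvDiffWitness_generate_invalid_in_range_p1.2) ∧ D_generate_invalid_in_range_p1 (pvDiffWitness_generate_invalid_in_range_p1.1) (pvDiffWitness_generate_invalid_in_range_p1.2) ∧ generate_invalid_in_range_p1 (pvDiffWitness_generate_invalid_in_range_p1.1) (pvDiffWitness_generate_invalid_in_range_p1.2) = pvDiffWitnessOut_generate_invalid_in_range_p1.1 ∧ generate_invalid_in_range_p1_alt (pvDiffWitness_generate_invalid_in_range_p1.1) (pvDiffWitness_generate_invalid_in_range_p1.2) = pvDiffWitnessOut_generate_invalid_in_range_p1.2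 ∧ pvDiffWitnessOut_generate_invalid_in_range_p1.1 ≠ pvDiffWitnessOut_generate_invalid_in_range_p1.2
def Claim_exact_generate_invalid_in_range_p1 : Prop := ∀ (low : Int) (high : Int), Dom_generate_invalid_in_range_p1 low high → Pre_generate_invalid_in_range_p1 low high → D_generate_invalid_in_range_p1 low high → generate_invalid_in_range_p1 low high ≠ generate_invalid_in_range_p1_alt low high

-- ===== LEMMAS AND PROOFS =====
-- one result block, as B builds it (parametrised by the inclusive cap on the half i)
def pvBlock (low high m g cap : Int) : List Int :=
  (PySem.List.pyRange (max g (-(PySem.Int.floordiv (-low) m))) ((min cap (PySem.Int.floordiv high m)) + 1) 1).map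
    (fun i => i * m)

lemma pvDigitChar_toNat (d : Nat) (hd : d < 10) : (Nat.digitChar d).toNat = 48 + d := by
  interval_cases d <;> rfl

lemma pvFoldl_toDigits (n : Nat) : ∀ a : Nat,
    (Nat.toDigits 10 n).foldl pvStep a = a * 10 ^ (Nat.toDigits 10 n).length + n := by
  induction n using Nat.strong_induction_on with
  | _ n ih =>
    intro a
    by_cases h : n < 10
    · rw [Nat.toDigits_of_lt_base h]
      simp [pvStep, pvDigitChar_toNat n h]
    · rw [Nat.toDigits_of_base_le (by norm_num) (by omega)]
      rw [List.foldl_append, List.length_append]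
      rw [ih (n / 10) (by omega) a]
      simp [List.foldl, pvStep, pvDigitChar_toNat (n % 10) (Nat.mod_lt _ (by norm_num))]
      rw [pow_succ]
      have := Nat.div_add_mod n 10
      ring_nf
      omega

lemma pvToDigits_all_digit (n : Nat) : ∀ c ∈ Nat.toDigits 10 n, c.isDigit = true := by
  intro c hc
  exact Nat.isDigit_of_mem_toDigits (by norm_num) (by norm_num) hc

lemma pvDigitsVal?_toDigits (n : Nat) : pvDigitsVal? (Nat.toDigits 10 n) = some n := by
  have hne : Nat.toDigits 10 n ≠ [] := by
    have := Nat.length_toDigits_pos (b := 10) (n := n)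
    intro h; rw [h] at this; simp at this
  have hall : (Nat.toDigits 10 n).all Char.isDigit = true := by
    rw [List.all_eq_true]; exact pvToDigits_all_digit n
  rw [pvDigitsVal?, if_pos ⟨hne, hall⟩, pvFoldl_toDigits n 0]
  simp

lemma pvInt?_of_digits (cs : List Char) (hne : cs ≠ []) (hd : ∀ c ∈ cs, c.isDigit = true) :
    pvInt? cs = (pvDigitsVal? cs).map (fun n => (n : Int)) := by
  cases cs with
  | nil => exact absurd rfl hne
  | cons c cs =>
    have hc : c.isDigit = true := hd c (by simp)
    have h1 : c ≠ '-' := by rintro rfl; simp [Char.isDigit] at hc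
    have h2 : c ≠ '+' := by rintro rfl; simp [Char.isDigit] at hc
    rw [pvInt?, if_neg (by simp [h1]), if_neg (by simp [h2])]

lemma pvInt?_toDigits (n : Nat) : pvInt? (Nat.toDigits 10 n) = some (n : Int) := by
  have hne : Nat.toDigits 10 n ≠ [] := by
    have := Nat.length_toDigits_pos (b := 10) (n := n)
    intro h; rw [h] at this; simp at this
  rw [pvInt?_of_digits _ hne (pvToDigits_all_digit n), pvDigitsVal?_toDigits]
  rfl

lemma pvInt?_double (n : Nat) :
    pvInt? (Nat.toDigits 10 n ++ Nat.toDigits 10 n)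
      = some ((n : Int) * ((10 : Int) ^ (Nat.toDigits 10 n).length + 1)) := by
  have hne : Nat.toDigits 10 n ≠ [] := by
    have := Nat.length_toDigits_pos (b := 10) (n := n)
    intro h; rw [h] at this; simp at this
  have hall : ∀ c ∈ Nat.toDigits 10 n ++ Nat.toDigits 10 n, c.isDigit = true := by
    intro c hc
    rcases List.mem_append.mp hc with h | h <;> exact pvToDigits_all_digit n c h
  rw [pvInt?_of_digits _ (by simp [hne]) hall]
  have hval : pvDigitsVal? (Nat.toDigits 10 n ++ Nat.toDigits 10 n)
      = some (n * 10 ^ (Nat.toDigits 10 n).length + n) := by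
    rw [pvDigitsVal?, if_pos ⟨by simp [hne], by rw [List.all_eq_true]; exact hall⟩]
    rw [List.foldl_append, pvFoldl_toDigits n 0, pvFoldl_toDigits n]
    simp
  rw [hval]
  simp
  ring

lemma pvToChars_nonneg (i : Int) (h : 0 ≤ i) : PySem.Int.toChars i = Nat.toDigits 10 i.toNat := by
  simp [PySem.Int.toChars, Int.not_lt.mpr h]

lemma pvLen_lt_iff (n k : Nat) (hk : 0 < k) :
    (Nat.toDigits 10 n).length ≤ k ↔ n < 10 ^ k :=
  Nat.length_toDigits_le_iff (by norm_num) hk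

lemma pvLen_mono (n m : Nat) (h : n ≤ m) :
    (Nat.toDigits 10 n).length ≤ (Nat.toDigits 10 m).length := by
  have hpos : 0 < (Nat.toDigits 10 m).length := Nat.length_toDigits_pos
  have hm : m < 10 ^ (Nat.toDigits 10 m).length :=
    (pvLen_lt_iff m _ hpos).mp le_rfl
  exact (pvLen_lt_iff n _ hpos).mpr (by omega)

lemma pvToDigits_div_pow (n : Nat) : ∀ k : Nat, k + 1 ≤ (Nat.toDigits 10 n).length →
    Nat.toDigits 10 (n / 10 ^ k) = (Nat.toDigits 10 n).take ((Nat.toDigits 10 n).length - k) := by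
  intro k
  induction k with
  | zero => intro _; simp
  | succ k ih =>
    intro hk
    have hxlarge : 10 ^ (k + 1) ≤ n := by
      by_contra hc
      have := (pvLen_lt_iff n (k + 1) (by omega)).mpr (by omega)
      omega
    have hx10 : 10 ≤ n / 10 ^ k := by
      rw [Nat.le_div_iff_mul_le (pow_pos (by norm_num : (0:Nat) < 10) k)]
      calc 10 * 10 ^ k = 10 ^ (k + 1) := by ring
        _ ≤ n := hxlarge
    have hstep : Nat.toDigits 10 (n / 10 ^ k)
        = Nat.toDigits 10 (n / 10 ^ k / 10) ++ [(n / 10 ^ k % 10).digitChar] :=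
      Nat.toDigits_of_base_le (by norm_num) hx10
    have hdl : Nat.toDigits 10 (n / 10 ^ k / 10) = (Nat.toDigits 10 (n / 10 ^ k)).dropLast := by
      rw [hstep, List.dropLast_concat]
    have hdiv : n / 10 ^ (k + 1) = n / 10 ^ k / 10 := by
      rw [Nat.div_div_eq_div_mul, pow_succ]
    have hlen : ((Nat.toDigits 10 n).take ((Nat.toDigits 10 n).length - k)).length
        = (Nat.toDigits 10 n).length - k := by
      rw [List.length_take]; omega
    rw [hdiv, hdl, ih (by omega), List.dropLast_eq_take, hlen, List.take_take]
    congr 1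
    omega

lemma pvLoopA_eq (low high : Int) (f : Int → Int) : ∀ (l : List Int) (acc : List Int),
    (∀ i ∈ l, pvInt? (PySem.List.pyRepeat (PySem.Int.toChars i) 2) = some (f i)) →
    (l.map f).Pairwise (· ≤ ·) →
    pvLoopA low high acc l = acc ++ (l.filter (fun i => decide (low ≤ f i ∧ f i ≤ high))).map f := by
  intro l
  induction l with
  | nil => intro acc _ _; simp [pvLoopA]
  | cons i rest ih =>
    intro acc hf hmono
    have hv := hf i (List.mem_cons_self ..)
    rw [List.map_cons, List.pairwise_cons] at hmono
    obtain ⟨hle, hmono'⟩ := hmono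
    have hf' : ∀ j ∈ rest, pvInt? (PySem.List.pyRepeat (PySem.Int.toChars j) 2) = some (f j) :=
      fun j hj => hf j (List.mem_cons_of_mem _ hj)
    simp only [pvLoopA, hv]
    by_cases hhigh : high < f i
    · rw [if_pos hhigh, List.filter_cons]
      have hfalse : decide (low ≤ f i ∧ f i ≤ high) = false := by
        simp only [decide_eq_false_iff_not]; omega
      have hnil : (rest.filter (fun j => decide (low ≤ f j ∧ f j ≤ high))) = [] := by
        apply List.filter_eq_nil_iff.mpr
        intro j hj
        have hij : f i ≤ f j := hle (f j) (List.mem_map_of_mem hj)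
        simp only [decide_eq_true_eq]; omega
      simp [hfalse]
      intro j hj _
      have := hle (f j) (List.mem_map_of_mem hj)
      omega
    · rw [if_neg hhigh]
      by_cases hlow : low ≤ f i
      · rw [if_pos ⟨hlow, by omega⟩, ih (acc ++ [f i]) hf' hmono', List.filter_cons]
        have htrue : decide (low ≤ f i ∧ f i ≤ high) = true := by
          simp only [decide_eq_true_eq]; omega
        simp [htrue, List.append_assoc]
      · rw [if_neg (fun hc => hlow hc.1), ih acc hf' hmono', List.filter_cons]
        have hfalse : decide (low ≤ f i ∧ f i ≤ high) = false := by
          simp only [decide_eq_false_iff_not]; omega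
        simp [hfalse]

lemma pvFilter_interval (a b c d : Int) :
    (PySem.List.pyRange a b 1).filter (fun i => decide (c ≤ i ∧ i ≤ d))
      = PySem.List.pyRange (max a c) (min b (d + 1)) 1 := by
  have h1 : ((PySem.List.pyRange a b 1).filter (fun i => decide (c ≤ i ∧ i ≤ d))).Nodup :=
    (PySem.List.nodup_pyRange_one a b).filter _
  have h2 : (PySem.List.pyRange (max a c) (min b (d + 1)) 1).Nodup :=
    PySem.List.nodup_pyRange_one _ _
  have hp1 : ((PySem.List.pyRange a b 1).filter (fun i => decide (c ≤ i ∧ i ≤ d))).Pairwise (· < ·) :=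
    (PySem.List.pairwise_lt_pyRange_one a b).filter _
  have hp2 : (PySem.List.pyRange (max a c) (min b (d + 1)) 1).Pairwise (· < ·) :=
    PySem.List.pairwise_lt_pyRange_one _ _
  have hperm := List.perm_of_nodup_nodup_toFinset_eq h1 h2 (by
    ext x
    simp [PySem.List.mem_pyRange_one]
    omega)
  exact List.eq_of_perm_of_sorted (fun x y _ _ hxy hyx => (lt_asymm hxy hyx).elim) hp1 hp2 hperm

lemma pvPart (low high a b m : Int) (hm : 0 < m) :
    ((PySem.List.pyRange a b 1).filter (fun i => decide (low ≤ i * m ∧ i * m ≤ high))).map (fun i => i * m)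
      = pvBlock low high m a (b - 1) := by
  have hpred : ∀ i : Int, (decide (low ≤ i * m ∧ i * m ≤ high))
      = (decide (-(PySem.Int.floordiv (-low) m) ≤ i ∧ i ≤ PySem.Int.floordiv high m)) := by
    intro i
    rw [decide_eq_decide]
    have hL : low ≤ i * m ↔ -(PySem.Int.floordiv (-low) m) ≤ i := by
      rw [neg_le, PySem.Int.le_floordiv_iff_mul_le hm, neg_mul, neg_le_neg_iff]
    have hR : i * m ≤ high ↔ i ≤ PySem.Int.floordiv high m :=
      (PySem.Int.le_floordiv_iff_mul_le hm).symm
    rw [hL, hR]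
  rw [List.filter_congr (fun i _ => hpred i), pvFilter_interval]
  unfold pvBlock
  have hb : min b (PySem.Int.floordiv high m + 1) = min (b - 1) (PySem.Int.floordiv high m) + 1 := by
    omega
  rw [hb]

theorem pvMain (low high : Int) (h : Nat) (s : Int)
    (h1 : 1 ≤ h) (hs1 : (10 : Int) ^ (h - 1) ≤ s) (hs2 : s ≤ (10 : Int) ^ h - 1) :
    pvLoopA low high [] (PySem.List.pyRange s ((10 : Int) ^ (h + 1) - 1) 1)
      = pvBlock low high ((10 : Int) ^ h + 1) s ((10 : Int) ^ h - 1)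
        ++ pvBlock low high ((10 : Int) ^ (h + 1) + 1) ((10 : Int) ^ h) ((10 : Int) ^ (h + 1) - 2) := by
  have hp1 : (1 : Int) ≤ 10 ^ (h - 1) := by
    have := pow_pos (by norm_num : (0:Int) < 10) (h - 1); omega
  have hpT : (1 : Int) ≤ 10 ^ h := by
    have := pow_pos (by norm_num : (0:Int) < 10) h; omega
  have hsucc : (10 : Int) ^ (h + 1) = 10 ^ h * 10 := pow_succ 10 h
  have hsT : s ≤ (10 : Int) ^ h := by omega
  have hTE : (10 : Int) ^ h ≤ 10 ^ (h + 1) - 1 := by omega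
  set f : Int → Int := fun i => i * ((10 : Int) ^ (Nat.toDigits 10 i.toNat).length + 1) with hfdef
  have hlen_of : ∀ (i : Int) (k : Nat), 1 ≤ k → (10 : Int) ^ (k - 1) ≤ i → i < (10 : Int) ^ k →
      (Nat.toDigits 10 i.toNat).length = k := by
    intro i k hk hlo hhi
    have hi0 : 0 ≤ i := by
      have := pow_pos (by norm_num : (0:Int) < 10) (k - 1); omega
    have hti : ((i.toNat : Nat) : Int) = i := Int.toNat_of_nonneg hi0
    have hub : i.toNat < 10 ^ k := by
      have h2 : ((i.toNat : Nat) : Int) < (10 : Int) ^ k := by rw [hti]; exact hhi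
      exact_mod_cast h2
    have hlb : 10 ^ (k - 1) ≤ i.toNat := by
      have h2 : (10 : Int) ^ (k - 1) ≤ ((i.toNat : Nat) : Int) := by rw [hti]; exact hlo
      exact_mod_cast h2
    refine le_antisymm ((pvLen_lt_iff i.toNat k (by omega)).mpr hub) ?_
    by_contra hlt
    have hle : (Nat.toDigits 10 i.toNat).length ≤ k - 1 := by omega
    by_cases hk1 : k = 1
    · subst hk1
      have := Nat.length_toDigits_pos (b := 10) (n := i.toNat)
      omega
    · have := (pvLen_lt_iff i.toNat (k - 1) (by omega)).mp hle
      omega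
  have hf : ∀ i ∈ PySem.List.pyRange s ((10 : Int) ^ (h + 1) - 1) 1,
      pvInt? (PySem.List.pyRepeat (PySem.Int.toChars i) 2) = some (f i) := by
    intro i hi
    rw [PySem.List.mem_pyRange_one] at hi
    have hi0 : 0 ≤ i := by omega
    have hrep : PySem.List.pyRepeat (PySem.Int.toChars i) 2
        = PySem.Int.toChars i ++ PySem.Int.toChars i := by
      simp [PySem.List.pyRepeat, List.replicate]
    rw [hrep, pvToChars_nonneg i hi0, pvInt?_double, Int.toNat_of_nonneg hi0]
  have hmono : ((PySem.List.pyRange s ((10 : Int) ^ (h + 1) - 1) 1).map f).Pairwise (· ≤ ·) := by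
    rw [List.pairwise_map]
    refine (PySem.List.pairwise_lt_pyRange_one _ _).imp_of_mem ?_
    intro a b ha hb hab
    rw [PySem.List.mem_pyRange_one] at ha hb
    have ha0 : 0 ≤ a := by omega
    have hb0 : 0 ≤ b := by omega
    have hlenle : (Nat.toDigits 10 a.toNat).length ≤ (Nat.toDigits 10 b.toNat).length :=
      pvLen_mono _ _ (by omega)
    have hpow : (10 : Int) ^ (Nat.toDigits 10 a.toNat).length ≤ (10 : Int) ^ (Nat.toDigits 10 b.toNat).length :=
      pow_le_pow_right₀ (by norm_num) hlenle
    have h10a := pow_pos (by norm_num : (0:Int) < 10) (Nat.toDigits 10 a.toNat).length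
    exact mul_le_mul (by omega) (by omega) (by omega) (by omega)
  rw [pvLoopA_eq low high f _ [] hf hmono, List.nil_append,
    PySem.List.pyRange_one_append s ((10 : Int) ^ h) ((10 : Int) ^ (h + 1) - 1) hsT hTE,
    List.filter_append, List.map_append]
  have part : ∀ (a b : Int) (k : Nat), 1 ≤ k → (10 : Int) ^ (k - 1) ≤ a → b ≤ (10 : Int) ^ k →
      ((PySem.List.pyRange a b 1).filter (fun i => decide (low ≤ f i ∧ f i ≤ high))).map f
        = pvBlock low high ((10 : Int) ^ k + 1) a (b - 1) := by
    intro a b k hk hak hbk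
    have hmem : ∀ i ∈ PySem.List.pyRange a b 1, f i = i * ((10 : Int) ^ k + 1) := by
      intro i hi
      rw [PySem.List.mem_pyRange_one] at hi
      have : (Nat.toDigits 10 i.toNat).length = k := hlen_of i k hk (by omega) (by omega)
      rw [hfdef]
      simp only []
      rw [this]
    have hmk : (0 : Int) < 10 ^ k + 1 := by
      have := pow_pos (by norm_num : (0:Int) < 10) k; omega
    calc ((PySem.List.pyRange a b 1).filter (fun i => decide (low ≤ f i ∧ f i ≤ high))).map f
        = ((PySem.List.pyRange a b 1).filter
            (fun i => decide (low ≤ i * ((10 : Int) ^ k + 1) ∧ i * ((10 : Int) ^ k + 1) ≤ high))).map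
            (fun i => i * ((10 : Int) ^ k + 1)) := by
          rw [List.filter_congr (fun i hi => by rw [hmem i hi])]
          exact List.map_congr_left (fun i hi => hmem i (List.mem_of_mem_filter hi))
      _ = pvBlock low high ((10 : Int) ^ k + 1) a (b - 1) := pvPart low high a b _ hmk
  rw [part s ((10 : Int) ^ h) h h1 hs1 le_rfl,
    part ((10 : Int) ^ h) ((10 : Int) ^ (h + 1) - 1) (h + 1) (by omega) (by simp) (by omega)]
  have he : (10 : Int) ^ (h + 1) - 1 - 1 = 10 ^ (h + 1) - 2 := by ring
  rw [he]

lemma pvModCast (len : Nat) : PySem.Int.mod ((len : Nat) : Int) 2 = ((len % 2 : Nat) : Int) := by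
  exact_mod_cast PySem.Int.mod_natCast len 2

lemma pvFloorCast (a b : Nat) : PySem.Int.floordiv ((a : Nat) : Int) ((b : Nat) : Int) = ((a / b : Nat) : Int) := by
  exact_mod_cast PySem.Int.floordiv_natCast a b

lemma pvToCharsLen_pos (low : Int) : 0 < (PySem.Int.toChars low).length := by
  rw [PySem.Int.toChars]
  split
  · simp
  · exact Nat.length_toDigits_pos

lemma pvFoldl_zeros (k : Nat) : ∀ a : Nat, (List.replicate k '0').foldl pvStep a = a * 10 ^ k := by
  induction k with
  | zero => intro a; simp
  | succ k ih =>
    intro a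
    rw [List.replicate_succ, List.foldl_cons, ih]
    simp [pvStep]
    ring

lemma pvFoldl_nines (k : Nat) : ∀ a : Nat, (List.replicate k '9').foldl pvStep a = (a + 1) * 10 ^ k - 1 := by
  induction k with
  | zero => intro a; simp
  | succ k ih =>
    intro a
    rw [List.replicate_succ, List.foldl_cons, ih]
    have : pvStep a '9' = a * 10 + 9 := by simp [pvStep]
    rw [this]
    have hp : 1 ≤ 10 ^ k := Nat.one_le_pow _ _ (by norm_num)
    rw [pow_succ]
    cases Nat.exists_eq_add_of_le hp with
    | intro c hc => rw [hc]; ring_nf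

lemma pvInt?_nines (k : Nat) : pvInt? (List.replicate (k + 1) '9') = some ((10 : Int) ^ (k + 1) - 1) := by
  have hd : ∀ c ∈ List.replicate (k + 1) '9', c.isDigit = true := by
    intro c hc; rw [List.eq_of_mem_replicate hc]; rfl
  rw [pvInt?_of_digits _ (by simp) hd]
  rw [pvDigitsVal?, if_pos ⟨by simp, by rw [List.all_eq_true]; exact hd⟩]
  rw [pvFoldl_nines]
  have h1 : 1 ≤ 10 ^ (k + 1) := Nat.one_le_pow _ _ (by norm_num)
  simp [Nat.cast_sub h1]

lemma pvInt?_one_zeros (k : Nat) : pvInt? ('1' :: List.replicate k '0') = some ((10 : Int) ^ k) := by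
  have hd : ∀ c ∈ '1' :: List.replicate k '0', c.isDigit = true := by
    intro c hc
    rcases List.mem_cons.mp hc with h | h
    · rw [h]; rfl
    · rw [List.eq_of_mem_replicate h]; rfl
  rw [pvInt?_of_digits _ (by simp) hd]
  rw [pvDigitsVal?, if_pos ⟨by simp, by rw [List.all_eq_true]; exact hd⟩]
  rw [List.foldl_cons]
  have : pvStep 0 '1' = 1 := by simp [pvStep]
  rw [this, pvFoldl_zeros]
  simp

lemma pvA_odd (low high : Int) (hodd : (PySem.Int.toChars low).length % 2 = 1) :
    generate_invalid_in_range_p1 low high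
      = pvLoopA low high []
          (PySem.List.pyRange ((10 : Int) ^ (((PySem.Int.toChars low).length + 1) / 2 - 1))
            ((10 : Int) ^ (((PySem.Int.toChars low).length + 1) / 2 + 1) - 1) 1) := by
  set len := (PySem.Int.toChars low).length with hlen
  obtain ⟨H, hH⟩ : ∃ k, k = (len + 1) / 2 := ⟨_, rfl⟩
  rw [← hH]
  have hH1 : 1 ≤ H := by omega
  have hcond : PySem.Int.mod ((len : Nat) : Int) 2 = 1 := by
    rw [pvModCast, hodd]; norm_num
  have hfd : PySem.Int.floordiv (((len : Nat) : Int) + 1) 2 = ((H : Nat) : Int) := by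
    have h2 : (((len : Nat) : Int) + 1) = (((len + 1 : Nat) : Nat) : Int) := by push_cast; ring
    rw [h2, show (2 : Int) = ((2 : Nat) : Int) from rfl, pvFloorCast, hH]
  have htn : (((H : Nat) : Int) + 1).toNat = H + 1 := by omega
  simp only [generate_invalid_in_range_p1, ← hlen, hcond, if_pos, hfd, htn]
  have hslice : PySem.List.slice ('1' :: List.replicate (H + 1) '0') (some 0) (some ((H : Nat) : Int))
      = '1' :: List.replicate (H - 1) '0' := by
    rw [PySem.List.slice_zero_start, PySem.List.slice_to_natCast]
    obtain ⟨H', rfl⟩ : ∃ H', H = H' + 1 := ⟨H - 1, by omega⟩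
    rw [List.take_succ_cons, List.take_replicate]
    congr 2
    omega
  rw [hslice, pvInt?_one_zeros, pvInt?_nines]

lemma pvA_even (low high : Int) (h0 : 0 ≤ low) (heven : (PySem.Int.toChars low).length % 2 = 0) :
    generate_invalid_in_range_p1 low high
      = pvLoopA low high []
          (PySem.List.pyRange ((low.toNat / 10 ^ ((PySem.Int.toChars low).length / 2) : Nat) : Int)
            ((10 : Int) ^ ((PySem.Int.toChars low).length / 2 + 1) - 1) 1) := by
  have htc := pvToChars_nonneg low h0
  have hlp := pvToCharsLen_pos low
  set len := (PySem.Int.toChars low).length with hlen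
  obtain ⟨H, hH⟩ : ∃ k, k = len / 2 := ⟨_, rfl⟩
  rw [← hH]
  have hlen2 : len = 2 * H := by omega
  have hH1 : 1 ≤ H := by omega
  have hcond : (PySem.Int.mod ((len : Nat) : Int) 2 = 1) = False := by
    rw [pvModCast, heven]; norm_num
  have hfd : PySem.Int.floordiv ((len : Nat) : Int) 2 = ((H : Nat) : Int) := by
    rw [show (2 : Int) = ((2 : Nat) : Int) from rfl, pvFloorCast, hH]
  have htn : (((H : Nat) : Int) + 1).toNat = H + 1 := by omega
  have hslice : PySem.List.slice (PySem.Int.toChars low) (some 0) (some ((H : Nat) : Int))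
      = Nat.toDigits 10 (low.toNat / 10 ^ H) := by
    rw [PySem.List.slice_zero_start, PySem.List.slice_to_natCast, htc,
      pvToDigits_div_pow low.toNat H (by rw [← htc, ← hlen]; omega)]
    rw [← htc, ← hlen]
    congr 1
    omega
  simp only [generate_invalid_in_range_p1, ← hlen, hcond, if_false, hfd, htn]
  rw [hslice, pvInt?_toDigits, pvInt?_nines]

lemma pvHS_odd (low : Int) (hodd : (PySem.Int.toChars low).length % 2 = 1) :
    pvHalfStart low
      = (((((PySem.Int.toChars low).length + 1) / 2 : Nat) : Int),
         (10 : Int) ^ (((PySem.Int.toChars low).length + 1) / 2 - 1)) := by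
  set len := (PySem.Int.toChars low).length with hlen
  obtain ⟨H, hH⟩ : ∃ k, k = (len + 1) / 2 := ⟨_, rfl⟩
  rw [← hH]
  have hH1 : 1 ≤ H := by omega
  have hcond : PySem.Int.mod ((len : Nat) : Int) 2 = 1 := by
    rw [pvModCast, hodd]; norm_num
  have hfd : PySem.Int.floordiv (((len : Nat) : Int) + 1) 2 = ((H : Nat) : Int) := by
    have h2 : (((len : Nat) : Int) + 1) = (((len + 1 : Nat) : Nat) : Int) := by push_cast; ring
    rw [h2, show (2 : Int) = ((2 : Nat) : Int) from rfl, pvFloorCast, hH]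
  have htn : (((H : Nat) : Int) - 1).toNat = H - 1 := by omega
  simp only [pvHalfStart, ← hlen, hcond, if_pos, hfd, htn]

lemma pvHS_even (low : Int) (h0 : 0 ≤ low) (heven : (PySem.Int.toChars low).length % 2 = 0) :
    pvHalfStart low
      = ((((PySem.Int.toChars low).length / 2 : Nat) : Int),
         ((low.toNat / 10 ^ ((PySem.Int.toChars low).length / 2) : Nat) : Int)) := by
  set len := (PySem.Int.toChars low).length with hlen
  obtain ⟨H, hH⟩ : ∃ k, k = len / 2 := ⟨_, rfl⟩
  rw [← hH]
  have hcond : (PySem.Int.mod ((len : Nat) : Int) 2 = 1) = False := by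
    rw [pvModCast, heven]; norm_num
  have hfd : PySem.Int.floordiv ((len : Nat) : Int) 2 = ((H : Nat) : Int) := by
    rw [show (2 : Int) = ((2 : Nat) : Int) from rfl, pvFloorCast, hH]
  have htn : (((H : Nat) : Int)).toNat = H := by omega
  have hpw : ((10 : Int)) ^ H = (((10 ^ H : Nat) : Nat) : Int) := by push_cast; ring
  have hsd : PySem.Int.floordiv low ((10 : Int) ^ H) = ((low.toNat / 10 ^ H : Nat) : Int) := by
    have hcast : low = ((low.toNat : Nat) : Int) := by omega
    rw [hpw, hcast, pvFloorCast]
    simp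
  simp only [pvHalfStart, ← hlen, hcond, if_false, hfd, htn, hsd]

lemma pvB_blocks (low high : Int) (h : Nat) (s : Int)
    (hhs : pvHalfStart low = (((h : Nat) : Int), s)) :
    generate_invalid_in_range_p1_alt low high
      = pvBlock low high ((10 : Int) ^ h + 1) s ((10 : Int) ^ h - 1)
        ++ pvBlock low high ((10 : Int) ^ (h + 1) + 1) ((10 : Int) ^ h) ((10 : Int) ^ (h + 1) - 1) := by
  have hne : ((h : Int)) + 1 ≠ ((h : Int)) := by omega
  have ht0 : (((h : Nat) : Int)).toNat = h := by omega
  have ht1 : (((h : Nat) : Int) + 1).toNat = h + 1 := by omega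
  simp only [generate_invalid_in_range_p1_alt, hhs, List.foldl_cons, List.foldl_nil,
    List.nil_append, if_pos, if_neg hne, ht0, ht1]
  unfold pvBlock
  rfl

lemma pvBlock_cap (low high m g c1 c2 : Int)
    (h : min c1 (PySem.Int.floordiv high m) = min c2 (PySem.Int.floordiv high m)) :
    pvBlock low high m g c1 = pvBlock low high m g c2 := by
  unfold pvBlock
  rw [h]

lemma pvSq_id (h : Nat) :
    ((10 : Int) ^ (h + 1) - 1) * ((10 : Int) ^ (h + 1) + 1) = (10 : Int) ^ (2 * (h + 1)) - 1 := by
  rw [two_mul, pow_add]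
  ring

lemma pvLow_lt (low : Int) (h0 : 0 ≤ low) (k : Nat) (hk : (PySem.Int.toChars low).length ≤ k) :
    low < (10 : Int) ^ k := by
  have htc := pvToChars_nonneg low h0
  have hlp := pvToCharsLen_pos low
  have hn : low.toNat < 10 ^ k := by
    apply (pvLen_lt_iff low.toNat k (by omega)).mp
    rw [← htc]
    exact hk
  have h2 : ((low.toNat : Nat) : Int) < (((10 ^ k : Nat) : Nat) : Int) := by exact_mod_cast hn
  rw [Int.toNat_of_nonneg h0] at h2
  push_cast at h2
  exact h2

lemma pvBlock_split (low high : Int) (h : Nat)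
    (hlow : low ≤ (10 : Int) ^ (2 * (h + 1)) - 1)
    (hD : (10 : Int) ^ (2 * (h + 1)) - 1 ≤ high) :
    pvBlock low high ((10 : Int) ^ (h + 1) + 1) ((10 : Int) ^ h) ((10 : Int) ^ (h + 1) - 1)
      = pvBlock low high ((10 : Int) ^ (h + 1) + 1) ((10 : Int) ^ h) ((10 : Int) ^ (h + 1) - 2)
        ++ [((10 : Int) ^ (h + 1) - 1) * ((10 : Int) ^ (h + 1) + 1)] := by
  have hp := pow_pos (by norm_num : (0 : Int) < 10) h
  have hsucc : (10 : Int) ^ (h + 1) = 10 ^ h * 10 := pow_succ 10 h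
  have hm : (0 : Int) < 10 ^ (h + 1) + 1 := by omega
  have hq : (10 : Int) ^ (h + 1) - 1 ≤ PySem.Int.floordiv high ((10 : Int) ^ (h + 1) + 1) := by
    rw [PySem.Int.le_floordiv_iff_mul_le hm, pvSq_id]
    exact hD
  have hmin1 : min ((10 : Int) ^ (h + 1) - 1) (PySem.Int.floordiv high ((10 : Int) ^ (h + 1) + 1))
      = (10 : Int) ^ (h + 1) - 1 := by omega
  have hmin2 : min ((10 : Int) ^ (h + 1) - 2) (PySem.Int.floordiv high ((10 : Int) ^ (h + 1) + 1))
      = (10 : Int) ^ (h + 1) - 2 := by omega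
  have hceil : -(PySem.Int.floordiv (-low) ((10 : Int) ^ (h + 1) + 1)) ≤ (10 : Int) ^ (h + 1) - 1 := by
    have hfl : -((10 : Int) ^ (h + 1) - 1) ≤ PySem.Int.floordiv (-low) ((10 : Int) ^ (h + 1) + 1) := by
      rw [PySem.Int.le_floordiv_iff_mul_le hm]
      have := pvSq_id h
      nlinarith [pvSq_id h]
    omega
  have ha : max ((10 : Int) ^ h) (-(PySem.Int.floordiv (-low) ((10 : Int) ^ (h + 1) + 1)))
      ≤ (10 : Int) ^ (h + 1) - 1 := by omega
  unfold pvBlock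
  rw [hmin1, hmin2]
  rw [show (10 : Int) ^ (h + 1) - 2 + 1 = (10 : Int) ^ (h + 1) - 1 from by ring]
  rw [PySem.List.pyRange_one_append
      (max ((10 : Int) ^ h) (-(PySem.Int.floordiv (-low) ((10 : Int) ^ (h + 1) + 1))))
      ((10 : Int) ^ (h + 1) - 1) ((10 : Int) ^ (h + 1) - 1 + 1) ha (by omega)]
  rw [show PySem.List.pyRange ((10 : Int) ^ (h + 1) - 1) ((10 : Int) ^ (h + 1) - 1 + 1) 1
        = [(10 : Int) ^ (h + 1) - 1] from by
      rw [PySem.List.pyRange_one_cons (by omega), PySem.List.pyRange_one_eq_nil (by omega)]]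
  simp

lemma pvSetup (low high : Int) (hpre : Pre_generate_invalid_in_range_p1 low high) :
    ∃ (h : Nat) (s : Int), 1 ≤ h ∧
      low ≤ (10 : Int) ^ (2 * (h + 1)) - 1 ∧
      (D_generate_invalid_in_range_p1 low high ↔ (10 : Int) ^ (2 * (h + 1)) - 1 ≤ high) ∧
      generate_invalid_in_range_p1 low high
        = pvBlock low high ((10 : Int) ^ h + 1) s ((10 : Int) ^ h - 1)
          ++ pvBlock low high ((10 : Int) ^ (h + 1) + 1) ((10 : Int) ^ h) ((10 : Int) ^ (h + 1) - 2) ∧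
      generate_invalid_in_range_p1_alt low high
        = pvBlock low high ((10 : Int) ^ h + 1) s ((10 : Int) ^ h - 1)
          ++ pvBlock low high ((10 : Int) ^ (h + 1) + 1) ((10 : Int) ^ h) ((10 : Int) ^ (h + 1) - 1) := by
  have hlp := pvToCharsLen_pos low
  by_cases hodd : (PySem.Int.toChars low).length % 2 = 1
  · obtain ⟨H, hH⟩ : ∃ k, k = ((PySem.Int.toChars low).length + 1) / 2 := ⟨_, rfl⟩
    have hH1 : 1 ≤ H := by omega
    refine ⟨H, (10 : Int) ^ (H - 1), hH1, ?_, ?_, ?_, ?_⟩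
    · by_cases h0 : 0 ≤ low
      · have := pvLow_lt low h0 (2 * (H + 1)) (by omega)
        omega
      · have := pow_pos (by norm_num : (0 : Int) < 10) (2 * (H + 1))
        omega
    · unfold D_generate_invalid_in_range_p1
      rw [if_pos hodd, ← hH]
    · have hA := pvA_odd low high hodd
      rw [← hH] at hA
      rw [hA]
      apply pvMain low high H _ hH1 le_rfl
      obtain ⟨H', rfl⟩ : ∃ H', H = H' + 1 := ⟨H - 1, by omega⟩
      have hp := pow_pos (by norm_num : (0 : Int) < 10) H'
      have hs : (10 : Int) ^ (H' + 1) = 10 ^ H' * 10 := pow_succ 10 H'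
      simp only [Nat.add_sub_cancel]
      omega
    · exact pvB_blocks low high H _ (by rw [pvHS_odd low hodd, ← hH])
  · have h0 : 0 ≤ low := by
      rcases hpre with h | h
      · exact h
      · exact absurd h hodd
    have heven : (PySem.Int.toChars low).length % 2 = 0 := by omega
    obtain ⟨H, hH⟩ : ∃ k, k = (PySem.Int.toChars low).length / 2 := ⟨_, rfl⟩
    have hlen2 : (PySem.Int.toChars low).length = 2 * H := by omega
    have hH1 : 1 ≤ H := by omega
    have htc := pvToChars_nonneg low h0
    have hlenD : (Nat.toDigits 10 low.toNat).length = 2 * H := by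
      rw [← htc]; exact hlen2
    have hnlo : 10 ^ (2 * H - 1) ≤ low.toNat := by
      by_contra hc
      have := (pvLen_lt_iff low.toNat (2 * H - 1) (by omega)).mpr (by omega)
      omega
    have hnhi : low.toNat < 10 ^ (2 * H) :=
      (pvLen_lt_iff low.toNat (2 * H) (by omega)).mp (by omega)
    have hplo : 10 ^ (H - 1) ≤ low.toNat / 10 ^ H := by
      rw [Nat.le_div_iff_mul_le (pow_pos (by norm_num) H)]
      calc 10 ^ (H - 1) * 10 ^ H = 10 ^ (2 * H - 1) := by rw [← pow_add]; congr 1; omega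
        _ ≤ low.toNat := hnlo
    have hphi : low.toNat / 10 ^ H < 10 ^ H := by
      rw [Nat.div_lt_iff_lt_mul (pow_pos (by norm_num) H)]
      calc low.toNat < 10 ^ (2 * H) := hnhi
        _ = 10 ^ H * 10 ^ H := by rw [← pow_add]; congr 1; omega
    refine ⟨H, ((low.toNat / 10 ^ H : Nat) : Int), hH1, ?_, ?_, ?_, ?_⟩
    · have := pvLow_lt low h0 (2 * (H + 1)) (by omega)
      omega
    · unfold D_generate_invalid_in_range_p1
      rw [if_neg hodd, ← hH]
    · have hA := pvA_even low high h0 heven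
      rw [← hH] at hA
      rw [hA]
      apply pvMain low high H _ hH1
      · exact_mod_cast hplo
      · have hlt : ((low.toNat / 10 ^ H : Nat) : Int) < (10 : Int) ^ H := by exact_mod_cast hphi
        omega
    · exact pvB_blocks low high H _ (by rw [pvHS_even low h0 heven, ← hH])

-- ===== VERDICT (by name: the statements are the Claim_ definitions above) =====
theorem generate_invalid_in_range_p1_spec : Claim_unchanged_generate_invalid_in_range_p1 := by
  unfold Claim_unchanged_generate_invalid_in_range_p1
  intro low high _hdom hpre
  unfold Spec_generate_invalid_in_range_p1
  intro hnD
  obtain ⟨h, s, _h1, _hlow, hDiff, hA, hB⟩ := pvSetup low high hpre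
  have hhigh : high < (10 : Int) ^ (2 * (h + 1)) - 1 := by
    by_contra hc
    exact hnD (hDiff.mpr (by omega))
  rw [hA, hB]
  congr 1
  apply pvBlock_cap
  have hm : (0 : Int) < 10 ^ (h + 1) + 1 := by
    have := pow_pos (by norm_num : (0 : Int) < 10) (h + 1); omega
  have hq : PySem.Int.floordiv high ((10 : Int) ^ (h + 1) + 1) < (10 : Int) ^ (h + 1) - 1 := by
    rw [PySem.Int.floordiv_lt_iff_lt_mul hm, pvSq_id]
    exact hhigh
  omega

set_option maxRecDepth 100000 in
set_option maxHeartbeats 2000000 in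
theorem generate_invalid_in_range_p1_changed : Claim_changed_generate_invalid_in_range_p1 := by
  unfold Claim_changed_generate_invalid_in_range_p1
  decide

theorem generate_invalid_in_range_p1_tight : Claim_exact_generate_invalid_in_range_p1 := by
  unfold Claim_exact_generate_invalid_in_range_p1
  intro low high _hdom hpre hD
  obtain ⟨h, s, _h1, hlow, hDiff, hA, hB⟩ := pvSetup low high hpre
  have hhigh : (10 : Int) ^ (2 * (h + 1)) - 1 ≤ high := hDiff.mp hD
  rw [hA, hB, pvBlock_split low high h hlow hhigh]
  intro heq
  have hlen := congrArg List.length heq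
  simp only [List.length_append, List.length_cons, List.length_nil] at hlen
  omega
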